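-- pv_equiv track=rewrite | github.com/Muthres-1/DSA_A_TO_Z | Dp/Dp on LIS/longestStringChain.py | isPredecessor
-- ===== SOURCE A (Python) =====
-- def isPredecessor(word1,word2):
--     n1=len(word1)
--     n2=len(word2)
--     if n1!=n2+1:return False
--     first=0
--     second=0
--     while first<n1:
--         if second<n2 and word1[first]==word2[second]:
--             first+=1
--             second+=1
--         else:
--             first+=1
--     if first==n1 and second==n2:return True
--     else:return False
-- ===== SOURCE B (Python) =====
-- def isPredecessor(word1, word2):
--     if len(word1) != len(word2) + 1:
--         return False
--     for i in range(len(word1)):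
--         if word1[:i] + word1[i+1:] == word2:
--             return True
--     return False
-- ===== Notes on version B (the rewrite author's own statement) =====
-- stated objective: alternative
-- what changed: Replaced A's two-pointer greedy subsequence walk by enumerating every single-character deletion of word1 and comparing the result to word2.
import Mathlib
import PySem

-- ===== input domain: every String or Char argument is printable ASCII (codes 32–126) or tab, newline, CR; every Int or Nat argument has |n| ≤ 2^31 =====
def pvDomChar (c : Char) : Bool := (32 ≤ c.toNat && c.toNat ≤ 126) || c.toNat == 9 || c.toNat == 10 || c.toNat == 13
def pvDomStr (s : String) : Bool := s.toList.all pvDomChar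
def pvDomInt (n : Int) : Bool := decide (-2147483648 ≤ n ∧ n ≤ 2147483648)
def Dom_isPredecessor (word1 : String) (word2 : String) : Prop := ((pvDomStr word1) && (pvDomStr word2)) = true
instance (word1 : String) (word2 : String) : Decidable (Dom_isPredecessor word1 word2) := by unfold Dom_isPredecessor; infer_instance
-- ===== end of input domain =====

-- B replaces A's two-pointer greedy subsequence walk by enumerating every
-- single-character deletion of word1 and comparing it to word2 (alternative
-- decomposition, not faster).

-- ===== PORT A =====
-- A's while loop: `first` always advances through word1; `second` advances
-- through word2 on a character match. We recurse on the suffixes at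
-- `first`/`second` (the same state), returning whether word2 was consumed
-- (second == n2; first == n1 holds automatically at loop exit).
def isPredecessorWalk : List Char → List Char → Bool
  | [], ys => ys.isEmpty
  | _ :: xs, [] => isPredecessorWalk xs []
  | x :: xs, y :: ys => if x == y then isPredecessorWalk xs ys else isPredecessorWalk xs (y :: ys)

def isPredecessor (word1 : String) (word2 : String) : Bool :=
  if word1.toList.length ≠ word2.toList.length + 1 then false
  else isPredecessorWalk word1.toList word2.toList

-- ===== PORT B =====
-- for i in range(n1): if word1[:i] + word1[i+1:] == word2: return True
def isPredecessor_alt (word1 : String) (word2 : String) : Bool :=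
  if word1.toList.length ≠ word2.toList.length + 1 then false
  else (List.range word1.toList.length).any
    (fun i => (word1.toList.take i ++ word1.toList.drop (i + 1)) == word2.toList)

-- ===== PRECONDITION & SPEC =====
def Spec_isPredecessor (word1 : String) (word2 : String) (out : Bool) : Prop := out = isPredecessor_alt word1 word2
instance (word1 : String) (word2 : String) (out : Bool) : Decidable (Spec_isPredecessor word1 word2 out) := by unfold Spec_isPredecessor; infer_instance

-- ===== CLAIM (what is proved, stated in full; the proofs are below) =====
def Claim_equal_isPredecessor : Prop := ∀ (word1 : String) (word2 : String), Dom_isPredecessor word1 word2 → Spec_isPredecessor word1 word2 (isPredecessor word1 word2)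

-- ===== LEMMAS AND PROOFS =====

theorem walk_nil (xs : List Char) : isPredecessorWalk xs [] = true := by
  induction xs with
  | nil => rfl
  | cons x xs ih => simpa [isPredecessorWalk] using ih

-- A's greedy walk succeeds iff ys is a subsequence (sublist) of xs.
theorem walk_eq_true_iff (xs ys : List Char) :
    isPredecessorWalk xs ys = true ↔ ys.Sublist xs := by
  induction xs generalizing ys with
  | nil =>
    cases ys with
    | nil => simp [isPredecessorWalk]
    | cons y ys => simp [isPredecessorWalk, List.isEmpty]
  | cons x xs ih =>
    cases ys with
    | nil => simp [walk_nil]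
    | cons y ys =>
      simp only [isPredecessorWalk]
      by_cases h : x = y
      · subst h
        simp only [beq_self_eq_true, if_true, ih]
        constructor
        · intro hs; exact hs.cons₂ x
        · intro hs; exact List.cons_sublist_cons.mp hs
      · have hb : (x == y) = false := by simpa using h
        simp [hb, ih]
        constructor
        · intro hs; exact hs.cons x
        · intro hs
          cases hs with
          | cons _ h' => exact h'
          | cons₂ => exact absurd rfl h

-- deleting one character of xs yields a sublist
theorem exists_erase_iff_sublist (xs ys : List Char) (hlen : xs.length = ys.length + 1) :
    (∃ i < xs.length, xs.eraseIdx i = ys) ↔ ys.Sublist xs := by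
  constructor
  · rintro ⟨i, _, rfl⟩
    exact List.eraseIdx_sublist xs i
  · intro hs
    induction xs generalizing ys with
    | nil => simp at hlen
    | cons x xs ih =>
      cases hs with
      | cons _ h' =>
        -- ys <+ xs with xs.length = ys.length: equal
        have : ys = xs := h'.eq_of_length (by simp at hlen; omega)
        exact ⟨0, by simp, by simp [this]⟩
      | cons₂ _ h' =>
        rename_i ys'
        rcases ih ys' (by simpa using hlen) h' with ⟨i, hi, hei⟩
        exact ⟨i + 1, by simpa using hi, by simp [List.eraseIdx, hei]⟩

theorem alt_any_iff (l1 l2 : List Char) :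
    ((List.range l1.length).any (fun i => (l1.take i ++ l1.drop (i + 1)) == l2)) = true
      ↔ ∃ i < l1.length, l1.eraseIdx i = l2 := by
  simp only [List.any_eq_true, List.mem_range, beq_iff_eq]
  constructor
  · rintro ⟨i, hi, h⟩
    exact ⟨i, hi, by rw [List.eraseIdx_eq_take_drop_succ]; exact h⟩
  · rintro ⟨i, hi, h⟩
    exact ⟨i, hi, by rw [← List.eraseIdx_eq_take_drop_succ]; exact h⟩

-- ===== VERDICT (by name: the statement is the Claim_ definition above) =====
theorem isPredecessor_spec : Claim_equal_isPredecessor := by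
  intro word1 word2 _
  unfold Spec_isPredecessor isPredecessor isPredecessor_alt
  by_cases hlen : word1.toList.length = word2.toList.length + 1
  · rw [if_neg (not_not_intro hlen), if_neg (not_not_intro hlen)]
    have h1 := walk_eq_true_iff word1.toList word2.toList
    have h2 := (alt_any_iff word1.toList word2.toList).trans
      (exists_erase_iff_sublist word1.toList word2.toList hlen)
    exact Bool.eq_iff_iff.mpr (h1.trans h2.symm)
  · rw [if_pos hlen, if_pos hlen]
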